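-- pv_equiv track=rewrite | github.com/sg-wireless/Pymakr | Plugins/CheckerPlugins/CodeStyleChecker/CodeStyleFixer.py | __isProbablyInsideStringOrComment
-- ===== SOURCE A (Python) =====
-- def __isProbablyInsideStringOrComment(line, index):
--     """
--     Private method to check, if the given string might be inside a string
--     or comment.
--
--     @param line line to check (string)
--     @param index position inside line to check (integer)
--     @return flag indicating the possibility of being inside a string
--         or comment
--     """
--     # Check against being in a string.
--     for quote in ['"', "'"]:
--         pos = line.find(quote)
--         if pos != -1 and pos <= index:
--             return True
--
--     # Check against being in a comment.
--     pos = line.find('#')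
--     if pos != -1 and pos <= index:
--         return True
--
--     return False
-- ===== SOURCE B (Python) =====
-- def __isProbablyInsideStringOrComment(line, index):
--     """Single prefix pass: the index is 'inside' a string/comment iff some
--     quote or hash character occurs at a position <= index."""
--     return index >= 0 and any(ch in "\"'#" for ch in line[:index + 1])
-- ===== Notes on version B (the rewrite author's own statement) =====
-- stated objective: simpler
-- what changed: Replaced three separate whole-line str.find scans with a single one-pass membership test over the prefix line[:index+1], guarded by index >= 0.
import Mathlib
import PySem

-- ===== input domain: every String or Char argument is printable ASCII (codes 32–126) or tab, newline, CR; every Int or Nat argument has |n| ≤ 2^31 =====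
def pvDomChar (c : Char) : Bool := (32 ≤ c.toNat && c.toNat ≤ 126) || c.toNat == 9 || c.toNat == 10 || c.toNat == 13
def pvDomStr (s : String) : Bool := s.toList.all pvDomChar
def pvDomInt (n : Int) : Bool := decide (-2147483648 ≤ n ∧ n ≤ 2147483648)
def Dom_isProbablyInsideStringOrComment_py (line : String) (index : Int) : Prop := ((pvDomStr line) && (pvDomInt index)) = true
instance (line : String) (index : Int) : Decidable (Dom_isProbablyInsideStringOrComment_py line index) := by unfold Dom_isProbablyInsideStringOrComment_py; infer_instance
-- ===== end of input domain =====

-- B replaces A's three whole-line str.find scans by one membership pass over the prefix line[:index+1] (simpler).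

-- ===== PORT A =====
-- the 'for quote in ['"', "'"]' loop; the empty case falls through to the post-loop '#' check
def pyA_quoteLoop (line : String) (index : Int) : List String → Bool
  | [] =>
      let pos := PySem.Str.find line "#"
      if pos ≠ -1 ∧ pos ≤ index then true else false
  | quote :: rest =>
      let pos := PySem.Str.find line quote
      if pos ≠ -1 ∧ pos ≤ index then true else pyA_quoteLoop line index rest

def isProbablyInsideStringOrComment_py (line : String) (index : Int) : Bool :=
  pyA_quoteLoop line index ["\"", "'"]

-- ===== PORT B =====
def isProbablyInsideStringOrComment_py_alt (line : String) (index : Int) : Bool :=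
  decide (index ≥ 0) &&
    (PySem.List.slice line.toList none (some (index + 1))).any
      (fun ch => decide (ch ∈ ['"', '\'', '#']))

-- ===== PRECONDITION & SPEC =====
def Spec_isProbablyInsideStringOrComment_py (line : String) (index : Int) (out : Bool) : Prop := out = isProbablyInsideStringOrComment_py_alt line index
instance (line : String) (index : Int) (out : Bool) : Decidable (Spec_isProbablyInsideStringOrComment_py line index out) := by unfold Spec_isProbablyInsideStringOrComment_py; infer_instance

-- ===== CLAIM (what is proved, stated in full; the proofs are below) =====
def Claim_equal_isProbablyInsideStringOrComment_py : Prop := ∀ (line : String) (index : Int), Dom_isProbablyInsideStringOrComment_py line index → Spec_isProbablyInsideStringOrComment_py line index (isProbablyInsideStringOrComment_py line index)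

-- ===== LEMMAS AND PROOFS =====

-- one find-test of A ('line.find(c) != -1 and pos <= index') ↔ the character occurs in the prefix of length index+1
theorem find_single_char_iff (cs : List Char) (c : Char) (index : Int) :
    (PySem.Chars.find cs [c] ≠ -1 ∧ PySem.Chars.find cs [c] ≤ index) ↔
      (0 ≤ index ∧ c ∈ cs.take (index + 1).toNat) := by
  constructor
  · rintro ⟨h1, h2⟩
    have hnn : 0 ≤ PySem.Chars.find cs [c] := by
      have := PySem.Chars.neg_one_le_find cs [c]
      omega
    obtain ⟨hpre, _⟩ := PySem.Chars.find_spec (s := cs) (sub := [c]) hnn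
    set p := (PySem.Chars.find cs [c]).toNat with hp
    obtain ⟨t, ht⟩ := hpre
    have hlt : p < cs.length := by
      have : (cs.drop p).length ≠ 0 := by rw [← ht]; simp
      simp [List.length_drop] at this
      omega
    have h0 : cs[p]? = some c := by
      have h0' : (cs.drop p)[0]? = some c := by rw [← ht]; simp
      rw [List.getElem?_drop] at h0'
      simpa using h0'
    have hget : cs[p] = c := by
      rw [List.getElem?_eq_getElem hlt] at h0
      exact Option.some.inj h0
    refine ⟨by omega, ?_⟩
    rw [← hget]
    exact List.mem_take_iff_getElem.mpr ⟨p, by omega, rfl⟩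
  · rintro ⟨hi, hm⟩
    obtain ⟨i, hi2, hgi⟩ := List.mem_take_iff_getElem.mp hm
    have hil : i < cs.length := lt_of_lt_of_le hi2 (by simp)
    have hdrop : [c] <+: cs.drop i := by
      rw [List.drop_eq_getElem_cons hil, hgi]
      exact ⟨_, rfl⟩
    have h1 : PySem.Chars.find cs [c] ≠ -1 := by
      rw [PySem.Chars.find_ne_neg_one_iff]
      exact ((PySem.Chars.isIn_iff_infix _ _).mp
        ((PySem.Chars.exists_prefix_drop_iff_isIn _ _).mp ⟨i, hdrop⟩))
    have hnn : 0 ≤ PySem.Chars.find cs [c] := by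
      have := PySem.Chars.neg_one_le_find cs [c]
      omega
    obtain ⟨_, hmin⟩ := PySem.Chars.find_spec (s := cs) (sub := [c]) hnn
    have hple : (PySem.Chars.find cs [c]).toNat ≤ i := by
      by_contra hlt
      exact hmin i (by omega) hdrop
    refine ⟨h1, ?_⟩
    have : i < (index + 1).toNat := lt_of_lt_of_le hi2 (by simp)
    omega

theorem ports_agree (line : String) (index : Int) :
    isProbablyInsideStringOrComment_py line index = isProbablyInsideStringOrComment_py_alt line index := by
  simp only [isProbablyInsideStringOrComment_py, pyA_quoteLoop,
    isProbablyInsideStringOrComment_py_alt, PySem.Str.find_eq]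
  have t1 : ("\"" : String).toList = ['"'] := rfl
  have t2 : ("'" : String).toList = ['\''] := rfl
  have t3 : ("#" : String).toList = ['#'] := rfl
  simp only [t1, t2, t3, find_single_char_iff]
  by_cases hi : 0 ≤ index
  · have hsl : PySem.List.slice line.toList none (some (index + 1)) =
        line.toList.take (index + 1).toNat := by
      have he : (index + 1) = (((index + 1).toNat : Nat) : Int) := by omega
      rw [he, PySem.List.slice_to_natCast]
      norm_cast
    have hd : (decide (index ≥ 0)) = true := by simpa [ge_iff_le] using hi
    rw [hsl, hd, Bool.true_and]
    simp only [hi, true_and]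
    split_ifs with h1 h2 h3
    · symm; rw [List.any_eq_true]; exact ⟨'"', h1, by decide⟩
    · symm; rw [List.any_eq_true]; exact ⟨'\'', h2, by decide⟩
    · symm; rw [List.any_eq_true]; exact ⟨'#', h3, by decide⟩
    · symm; rw [List.any_eq_false]
      intro ch hch
      simp only [List.mem_cons, List.not_mem_nil, or_false, decide_eq_true_eq]
      rintro (rfl | rfl | rfl)
      · exact h1 hch
      · exact h2 hch
      · exact h3 hch
  · have hd : (decide (index ≥ 0)) = false := by simp [ge_iff_le]; omega
    rw [hd, Bool.false_and]
    split_ifs with h1 h2 h3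
    · exact absurd h1.1 hi
    · exact absurd h2.1 hi
    · exact absurd h3.1 hi
    · rfl

-- ===== VERDICT (by name: the statement is the Claim_ definition above) =====
theorem isProbablyInsideStringOrComment_py_spec : Claim_equal_isProbablyInsideStringOrComment_py := by
  intro line index _
  exact ports_agree line index
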